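-- pv_equiv track=rewrite | github.com/aialuke/prompt-improver | scripts/validate_architecture_improvements.py | validate_clean_architecture_layers
-- ===== SOURCE A (Python) =====
-- from typing import Dict, List, Set, Tuple
--
-- def validate_clean_architecture_layers(graph: Dict[str, Set[str]]) -> Dict[str, List[str]]:
--     """Validate that dependencies follow clean architecture layer rules."""
--     violations = {
--         'domain_violations': [],
--         'application_violations': [],
--         'infrastructure_violations': [],
--         'presentation_violations': []
--     }
--
--     # Define layer patterns
--     layer_patterns = {
--         'domain': ['domain.', 'shared.interfaces.', 'shared.types.'],
--         'application': ['application.', 'domain.', 'shared.'],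
--         'infrastructure': ['infrastructure.', 'application.', 'domain.', 'shared.'],
--         'presentation': ['presentation.', 'application.', 'domain.', 'shared.']
--     }
--
--     for module, dependencies in graph.items():
--         # Determine module layer
--         module_layer = None
--         for layer, patterns in layer_patterns.items():
--             if any(pattern in module for pattern in patterns):
--                 module_layer = layer
--                 break
--
--         if not module_layer:
--             continue
--
--         # Check if dependencies violate layer rules
--         for dep in dependencies:
--             dep_layer = None
--             for layer, patterns in layer_patterns.items():
--                 if any(pattern in dep for pattern in patterns):
--                     dep_layer = layer
--                     break
--
--             if not dep_layer:
--                 continue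
--
--             # Check for violations
--             if module_layer == 'domain' and dep_layer in ['application', 'infrastructure', 'presentation']:
--                 violations['domain_violations'].append(f"{module} -> {dep}")
--             elif module_layer == 'application' and dep_layer in ['infrastructure', 'presentation']:
--                 violations['application_violations'].append(f"{module} -> {dep}")
--
--     return violations
-- ===== SOURCE B (Python) =====
-- def validate_clean_architecture_layers(graph):
--     """Validate that dependencies follow clean architecture layer rules."""
--     LAYERS = ['domain', 'application', 'infrastructure', 'presentation']
--     PATTERNS = [
--         ['domain.', 'shared.interfaces.', 'shared.types.'],
--         ['application.', 'domain.', 'shared.'],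
--         ['infrastructure.', 'application.', 'domain.', 'shared.'],
--         ['presentation.', 'application.', 'domain.', 'shared.'],
--     ]
--
--     def rank(name):
--         for r, pats in enumerate(PATTERNS):
--             if any(p in name for p in pats):
--                 return r
--         return None
--
--     def edges_violating(m):
--         # a violation is an edge from a rank-m module to a strictly higher-ranked dep
--         return [f"{module} -> {dep}"
--                 for module, deps in graph.items()
--                 if rank(module) == m
--                 for dep in deps
--                 for d in [rank(dep)]
--                 if d is not None and d > m]
--
--     # only domain (0) and application (1) modules carry layer rules
--     return {layer + '_violations': (edges_violating(r) if r < 2 else [])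
--             for r, layer in enumerate(LAYERS)}
-- ===== Notes on version B (the rewrite author's own statement) =====
-- stated objective: simpler
-- what changed: Replaces A's single pass with nested name-branch if/elif chains and dict mutation by an integer-rank classifier (layer = index in the pattern table) plus one per-layer comprehension pass, with the violation rule reduced to the arithmetic comparison dep_rank > module_rank for module_rank < 2.
import Mathlib
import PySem

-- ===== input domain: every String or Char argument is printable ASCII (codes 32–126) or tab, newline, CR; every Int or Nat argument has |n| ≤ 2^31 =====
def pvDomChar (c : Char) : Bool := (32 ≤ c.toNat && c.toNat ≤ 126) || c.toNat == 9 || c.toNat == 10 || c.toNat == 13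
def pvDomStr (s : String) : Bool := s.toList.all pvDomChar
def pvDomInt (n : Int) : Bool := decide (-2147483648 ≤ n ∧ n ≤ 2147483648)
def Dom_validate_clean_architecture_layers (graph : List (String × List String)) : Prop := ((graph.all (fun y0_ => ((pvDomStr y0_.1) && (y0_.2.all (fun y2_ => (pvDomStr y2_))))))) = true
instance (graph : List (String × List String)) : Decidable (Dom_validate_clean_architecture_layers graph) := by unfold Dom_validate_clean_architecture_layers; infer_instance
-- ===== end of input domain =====

-- B replaces A's inlined classification loops and name-keyed if/elif chains by an integer-rank
-- classifier and one per-layer comprehension pass (violation ⟺ dep_rank > module_rank < 2): simpler.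


-- ===== PORT A =====
-- layer_patterns dict, in A's insertion order
def pvLayerPatterns : List (String × List String) :=
  [("domain", ["domain.", "shared.interfaces.", "shared.types."]),
   ("application", ["application.", "domain.", "shared."]),
   ("infrastructure", ["infrastructure.", "application.", "domain.", "shared."]),
   ("presentation", ["presentation.", "application.", "domain.", "shared."])]

-- A's "for layer, patterns in layer_patterns.items(): if any(pattern in name ...): layer; break"
def pvModuleLayer (name : String) : Option String :=
  (pvLayerPatterns.find? (fun lp => lp.2.any (fun p => PySem.Str.isIn p name))).map (·.1)

def validate_clean_architecture_layers (graph : List (String × List String)) : List (String × List String) :=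
  let violations : PySem.Dict String (List String) := PySem.Dict.mk
    [("domain_violations", []), ("application_violations", []),
     ("infrastructure_violations", []), ("presentation_violations", [])]
  (graph.foldl (fun violations md =>
    match pvModuleLayer md.1 with
    | none => violations
    | some moduleLayer =>
      md.2.foldl (fun violations dep =>
        match pvModuleLayer dep with
        | none => violations
        | some depLayer =>
          if moduleLayer = "domain" ∧ depLayer ∈ (["application", "infrastructure", "presentation"] : List String) then
            violations.modify "domain_violations" [] (· ++ [md.1 ++ " -> " ++ dep])
          else if moduleLayer = "application" ∧ depLayer ∈ (["infrastructure", "presentation"] : List String) then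
            violations.modify "application_violations" [] (· ++ [md.1 ++ " -> " ++ dep])
          else violations) violations) violations).items

-- ===== PORT B =====
def pvLayers : List String := ["domain", "application", "infrastructure", "presentation"]

def pvPatternTable : List (List String) :=
  [["domain.", "shared.interfaces.", "shared.types."],
   ["application.", "domain.", "shared."],
   ["infrastructure.", "application.", "domain.", "shared."],
   ["presentation.", "application.", "domain.", "shared."]]

-- B's rank(name): index of the first pattern list matching name
def pvRank (name : String) : Option Nat :=
  pvPatternTable.findIdx? (fun pats => pats.any (fun p => PySem.Str.isIn p name))

-- B's edges_violating(m) comprehension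
def pvEdgesViolating (graph : List (String × List String)) (m : Nat) : List String :=
  graph.flatMap (fun md =>
    if pvRank md.1 = some m then
      md.2.filterMap (fun dep =>
        match pvRank dep with
        | some d => if m < d then some (md.1 ++ " -> " ++ dep) else none
        | none => none)
    else [])

def validate_clean_architecture_layers_alt (graph : List (String × List String)) : List (String × List String) :=
  pvLayers.zipIdx.map (fun li =>
    (li.1 ++ "_violations", if li.2 < 2 then pvEdgesViolating graph li.2 else []))

-- ===== PRECONDITION & SPEC =====
def Spec_validate_clean_architecture_layers (graph : List (String × List String)) (out : List (String × List String)) : Prop := out = validate_clean_architecture_layers_alt graph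
instance (graph : List (String × List String)) (out : List (String × List String)) : Decidable (Spec_validate_clean_architecture_layers graph out) := by unfold Spec_validate_clean_architecture_layers; infer_instance

-- ===== CLAIM (what is proved, stated in full; the proofs are below) =====
def Claim_equal_validate_clean_architecture_layers : Prop := ∀ (graph : List (String × List String)), Dom_validate_clean_architecture_layers graph → Spec_validate_clean_architecture_layers graph (validate_clean_architecture_layers graph)

-- ===== LEMMAS AND PROOFS =====

-- A's layer name is B's rank read through pvLayers
theorem moduleLayer_eq_rank (name : String) :
    pvModuleLayer name =
      match pvRank name with
      | none => none
      | some 0 => some "domain"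
      | some 1 => some "application"
      | some 2 => some "infrastructure"
      | some _ => some "presentation" := by
  unfold pvModuleLayer pvRank pvLayerPatterns pvPatternTable
  cases h1 : PySem.Str.isIn "domain." name <;>
  cases h2 : PySem.Str.isIn "shared.interfaces." name <;>
  cases h3 : PySem.Str.isIn "shared.types." name <;>
  cases h4 : PySem.Str.isIn "application." name <;>
  cases h5 : PySem.Str.isIn "shared." name <;>
  cases h6 : PySem.Str.isIn "infrastructure." name <;>
  cases h7 : PySem.Str.isIn "presentation." name <;>
    simp only [List.find?, List.findIdx?_cons, List.any_cons, List.any_nil, h1, h2, h3, h4, h5,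
      h6, h7, Bool.or_false, Bool.or_true] <;> rfl

-- the running dict of A: always these four keys, infrastructure/presentation empty
def pvD (a b : List String) : PySem.Dict String (List String) := PySem.Dict.mk
  [("domain_violations", a), ("application_violations", b),
   ("infrastructure_violations", []), ("presentation_violations", [])]

-- B's per-dep filterMap, for one module
def pvViol (module : String) (m : Nat) (deps : List String) : List String :=
  deps.filterMap (fun dep =>
    match pvRank dep with
    | some d => if m < d then some (module ++ " -> " ++ dep) else none
    | none => none)

-- A's step over one (module, deps) entry
def pvStepA (violations : PySem.Dict String (List String)) (md : String × List String) : PySem.Dict String (List String) :=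
  match pvModuleLayer md.1 with
  | none => violations
  | some moduleLayer =>
    md.2.foldl (fun violations dep =>
      match pvModuleLayer dep with
      | none => violations
      | some depLayer =>
        if moduleLayer = "domain" ∧ depLayer ∈ (["application", "infrastructure", "presentation"] : List String) then
          violations.modify "domain_violations" [] (· ++ [md.1 ++ " -> " ++ dep])
        else if moduleLayer = "application" ∧ depLayer ∈ (["infrastructure", "presentation"] : List String) then
          violations.modify "application_violations" [] (· ++ [md.1 ++ " -> " ++ dep])
        else violations) violations

theorem pvD_modify_dom (a b : List String) (f : List String → List String) :
    (pvD a b).modify "domain_violations" [] f = pvD (f a) b := by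
  simp [pvD, PySem.Dict.modify, PySem.Dict.insert, PySem.Dict.getD, PySem.Dict.get?, PySem.Dict.contains]

theorem pvD_modify_app (a b : List String) (f : List String → List String) :
    (pvD a b).modify "application_violations" [] f = pvD a (f b) := by
  simp [pvD, PySem.Dict.modify, PySem.Dict.insert, PySem.Dict.getD, PySem.Dict.get?, PySem.Dict.contains]

-- inner loop, module of layer "domain" (rank 0): appends pvViol … 0 to the first slot
theorem innerA_domain (module : String) (deps : List String) (a b : List String) :
    (deps.foldl (fun violations dep =>
      match pvModuleLayer dep with
      | none => violations
      | some depLayer =>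
        if ("domain" : String) = "domain" ∧ depLayer ∈ (["application", "infrastructure", "presentation"] : List String) then
          violations.modify "domain_violations" [] (· ++ [module ++ " -> " ++ dep])
        else if ("domain" : String) = "application" ∧ depLayer ∈ (["infrastructure", "presentation"] : List String) then
          violations.modify "application_violations" [] (· ++ [module ++ " -> " ++ dep])
        else violations) (pvD a b)) = pvD (a ++ pvViol module 0 deps) b := by
  induction deps generalizing a with
  | nil => simp [pvViol]
  | cons dep rest ih =>
    have h := moduleLayer_eq_rank dep
    simp only [List.foldl_cons]
    rcases hr : pvRank dep with _ | d
    · rw [h, hr]; simpa [pvViol, hr] using ih a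
    · match d with
      | 0 => rw [h, hr]; simp only []; rw [if_neg (by simp)]
             simpa [pvViol, hr] using ih a
      | 1 => rw [h, hr]; simp only []
             rw [if_pos (by simp), pvD_modify_dom]
             simpa [pvViol, hr] using ih (a ++ [module ++ " -> " ++ dep])
      | 2 => rw [h, hr]; simp only []
             rw [if_pos (by simp), pvD_modify_dom]
             simpa [pvViol, hr] using ih (a ++ [module ++ " -> " ++ dep])
      | (n+3) => rw [h, hr]; simp only []
                 rw [if_pos (by simp), pvD_modify_dom]
                 simpa [pvViol, hr] using ih (a ++ [module ++ " -> " ++ dep])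

-- inner loop, module of layer "application" (rank 1): appends pvViol … 1 to the second slot
theorem innerA_application (module : String) (deps : List String) (a b : List String) :
    (deps.foldl (fun violations dep =>
      match pvModuleLayer dep with
      | none => violations
      | some depLayer =>
        if ("application" : String) = "domain" ∧ depLayer ∈ (["application", "infrastructure", "presentation"] : List String) then
          violations.modify "domain_violations" [] (· ++ [module ++ " -> " ++ dep])
        else if ("application" : String) = "application" ∧ depLayer ∈ (["infrastructure", "presentation"] : List String) then
          violations.modify "application_violations" [] (· ++ [module ++ " -> " ++ dep])
        else violations) (pvD a b)) = pvD a (b ++ pvViol module 1 deps) := by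
  induction deps generalizing b with
  | nil => simp [pvViol]
  | cons dep rest ih =>
    have h := moduleLayer_eq_rank dep
    simp only [List.foldl_cons]
    rcases hr : pvRank dep with _ | d
    · rw [h, hr]; simpa [pvViol, hr] using ih b
    · match d with
      | 0 => rw [h, hr]; simp only []
             rw [if_neg (by simp), if_neg (by simp)]
             simpa [pvViol, hr] using ih b
      | 1 => rw [h, hr]; simp only []
             rw [if_neg (by simp), if_neg (by simp)]
             simpa [pvViol, hr] using ih b
      | 2 => rw [h, hr]; simp only []
             rw [if_neg (by simp), if_pos (by simp), pvD_modify_app]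
             simpa [pvViol, hr] using ih (b ++ [module ++ " -> " ++ dep])
      | (n+3) => rw [h, hr]; simp only []
                 rw [if_neg (by simp), if_pos (by simp), pvD_modify_app]
                 simpa [pvViol, hr] using ih (b ++ [module ++ " -> " ++ dep])

-- inner loop, module of layer "infrastructure"/"presentation": no branch fires
theorem innerA_noop (ml : String) (hd : ml ≠ "domain") (ha : ml ≠ "application")
    (module : String) (deps : List String) (v : PySem.Dict String (List String)) :
    (deps.foldl (fun violations dep =>
      match pvModuleLayer dep with
      | none => violations
      | some depLayer =>
        if ml = "domain" ∧ depLayer ∈ (["application", "infrastructure", "presentation"] : List String) then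
          violations.modify "domain_violations" [] (· ++ [module ++ " -> " ++ dep])
        else if ml = "application" ∧ depLayer ∈ (["infrastructure", "presentation"] : List String) then
          violations.modify "application_violations" [] (· ++ [module ++ " -> " ++ dep])
        else violations) v) = v := by
  induction deps generalizing v with
  | nil => rfl
  | cons dep rest ih =>
    simp only [List.foldl_cons]
    cases hml : pvModuleLayer dep
    case none => exact ih v
    case some dl =>
      simp only []
      rw [if_neg (by simp [hd]), if_neg (by simp [ha])]; exact ih v

-- the outer loop accumulates B's two comprehensions
theorem outerA (graph : List (String × List String)) (a b : List String) :
    graph.foldl pvStepA (pvD a b) =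
      pvD (a ++ pvEdgesViolating graph 0) (b ++ pvEdgesViolating graph 1) := by
  induction graph generalizing a b with
  | nil => simp [pvEdgesViolating]
  | cons md rest ih =>
    simp only [List.foldl_cons]
    have hstep : pvStepA (pvD a b) md =
        pvD (a ++ (if pvRank md.1 = some 0 then pvViol md.1 0 md.2 else []))
            (b ++ (if pvRank md.1 = some 1 then pvViol md.1 1 md.2 else [])) := by
      unfold pvStepA
      have h := moduleLayer_eq_rank md.1
      rcases hr : pvRank md.1 with _ | d
      · rw [h, hr]; simp
      · match d with
        | 0 => rw [h, hr]; simpa [hr] using innerA_domain md.1 md.2 a b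
        | 1 => rw [h, hr]; simpa [hr] using innerA_application md.1 md.2 a b
        | 2 => rw [h, hr]
               simpa [hr] using innerA_noop "infrastructure" (by decide) (by decide) md.1 md.2 (pvD a b)
        | (n+3) => rw [h, hr]
                   simpa [hr] using innerA_noop "presentation" (by decide) (by decide) md.1 md.2 (pvD a b)
    rw [hstep, ih]
    have hflat : ∀ m : Nat, pvEdgesViolating (md :: rest) m =
        (if pvRank md.1 = some m then pvViol md.1 m md.2 else []) ++ pvEdgesViolating rest m := by
      intro m; simp [pvEdgesViolating, pvViol]
    rw [hflat 0, hflat 1, List.append_assoc, List.append_assoc]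

-- ===== VERDICT (by name: the statement is the Claim_ definition above) =====
theorem validate_clean_architecture_layers_spec : Claim_equal_validate_clean_architecture_layers := by
  intro graph _
  unfold Spec_validate_clean_architecture_layers
  have hA : validate_clean_architecture_layers graph = (graph.foldl pvStepA (pvD [] [])).items := rfl
  have hB : validate_clean_architecture_layers_alt graph =
      [("domain_violations", pvEdgesViolating graph 0),
       ("application_violations", pvEdgesViolating graph 1),
       ("infrastructure_violations", []), ("presentation_violations", [])] := rfl
  rw [hA, outerA graph [] [], hB]
  simp [pvD]
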